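-- pv_equiv track=rewrite | github.com/mwwoodworth/brainops-ai-agents | aurea_personas.py | _expand_scopes
-- ===== SOURCE A (Python) =====
-- VALID_SCOPES = {"read_only", "operator", "admin"}
--
-- def _expand_scopes(scopes: set[str]) -> set[str]:
--     expanded = {scope for scope in scopes if scope in VALID_SCOPES}
--     if "admin" in expanded:
--         expanded.update({"operator", "read_only"})
--     elif "operator" in expanded:
--         expanded.add("read_only")
--     if not expanded:
--         expanded = {"read_only"}
--     return expanded
-- ===== SOURCE B (Python) =====
-- RANK = {"admin": 2, "operator": 1, "read_only": 0}
--
--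
-- def _expand_scopes(scopes: set[str]) -> set[str]:
--     present = {s for s in scopes if s in RANK}
--     if not present:
--         return {"read_only"}
--     top = max(RANK[s] for s in present)
--     return present | {s for s, r in RANK.items() if r < top}
-- ===== Notes on version B (the rewrite author's own statement) =====
-- stated objective: alternative
-- what changed: Replaces the admin/operator if-elif cascade with a rank table: one max over the ranks of the valid scopes present, then a union with all lower-ranked scopes (plus the same empty-input default).
import Mathlib
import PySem

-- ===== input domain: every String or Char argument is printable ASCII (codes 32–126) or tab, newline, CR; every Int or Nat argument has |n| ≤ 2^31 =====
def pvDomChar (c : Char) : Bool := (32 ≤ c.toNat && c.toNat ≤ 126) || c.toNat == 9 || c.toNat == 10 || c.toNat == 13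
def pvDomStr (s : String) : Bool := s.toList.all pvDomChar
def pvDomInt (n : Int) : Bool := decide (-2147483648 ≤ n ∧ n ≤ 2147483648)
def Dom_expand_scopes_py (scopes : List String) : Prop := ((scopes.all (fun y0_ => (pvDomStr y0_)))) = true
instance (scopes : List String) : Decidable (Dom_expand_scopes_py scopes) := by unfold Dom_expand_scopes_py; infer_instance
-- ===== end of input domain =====

set_option maxRecDepth 2000

-- B replaces A's if/elif privilege cascade by a rank table (max rank of the valid scopes
-- present, then a union with every lower-ranked scope); alternative decomposition, same cost.

-- ===== PORT A =====
def VALID_SCOPES : PySem.Set String := PySem.Set.ofList ["read_only", "operator", "admin"]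

def expand_scopes_py (scopes : List String) : List String :=
  let expanded : PySem.Set String :=
    PySem.Set.ofList (scopes.filter (fun s => PySem.Set.contains VALID_SCOPES s))
  let expanded :=
    if PySem.Set.contains expanded "admin" then
      PySem.Set.update expanded ["operator", "read_only"]
    else if PySem.Set.contains expanded "operator" then
      PySem.Set.add expanded "read_only"
    else expanded
  if expanded = [] then ["read_only"] else expanded

-- ===== PORT B =====
def RANK : PySem.Dict String Int :=
  PySem.Dict.ofList [("admin", 2), ("operator", 1), ("read_only", 0)]

def expand_scopes_py_alt (scopes : List String) : List String :=
  let present : PySem.Set String :=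
    PySem.Set.ofList (scopes.filter (fun s => RANK.contains s))
  if present = [] then ["read_only"]
  else
    -- max over a nonempty generator; the .getD 0 default is unreachable (present ≠ [])
    let top := (PySem.List.max? (present.map (fun s => RANK.getD s 0)) (fun x => x)).getD 0
    PySem.Set.union present ((RANK.items.filter (fun p => p.2 < top)).map Prod.fst)

-- ===== PRECONDITION & SPEC =====
def Spec_expand_scopes_py (scopes : List String) (out : List String) : Prop := out = expand_scopes_py_alt scopes
instance (scopes : List String) (out : List String) : Decidable (Spec_expand_scopes_py scopes out) := by unfold Spec_expand_scopes_py; infer_instance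

-- ===== CLAIM (what is proved, stated in full; the proofs are below) =====
def Claim_equal_expand_scopes_py : Prop := ∀ (scopes : List String), Dom_expand_scopes_py scopes → Spec_expand_scopes_py scopes (expand_scopes_py scopes)

-- ===== LEMMAS AND PROOFS =====

lemma rank_mk : RANK = PySem.Dict.mk [("admin", 2), ("operator", 1), ("read_only", 0)] := by
  decide

-- A's filter predicate (membership in VALID_SCOPES) agrees with B's (key of RANK)
lemma pred_eq (s : String) : PySem.Set.contains VALID_SCOPES s = RANK.contains s := by
  by_cases h1 : s = "read_only"
  · subst h1; decide
  by_cases h2 : s = "operator"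
  · subst h2; decide
  by_cases h3 : s = "admin"
  · subst h3; decide
  rw [rank_mk]
  simp only [VALID_SCOPES, PySem.Set.contains, PySem.Set.ofList, PySem.Dict.contains_mk]
  simp [h1, h2, h3, Ne.symm h1, Ne.symm h2, Ne.symm h3]

lemma mem3 (s : String) (h : RANK.contains s = true) :
    s ∈ (["read_only", "operator", "admin"] : List String) := by
  rw [rank_mk] at h
  simp [PySem.Dict.contains_mk] at h
  rcases h with h|h|h <;> simp [h.symm]

-- A's processing of the deduplicated valid-scope set E
def tailA (E : List String) : List String :=
  let expanded :=
    if PySem.Set.contains E "admin" then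
      PySem.Set.update E ["operator", "read_only"]
    else if PySem.Set.contains E "operator" then
      PySem.Set.add E "read_only"
    else E
  if expanded = [] then ["read_only"] else expanded

-- B's processing of the same set E
def tailB (E : List String) : List String :=
  if E = [] then ["read_only"]
  else
    let top := (PySem.List.max? (E.map (fun s => RANK.getD s 0)) (fun x => x)).getD 0
    PySem.Set.union E ((RANK.items.filter (fun p => p.2 < top)).map Prod.fst)

-- E is a nodup list over the three valid scopes: finitely many cases, checked by kernel evaluation
lemma tails_eq (E : List String) (hn : E.Nodup)
    (hs : ∀ x ∈ E, x ∈ (["read_only", "operator", "admin"] : List String)) :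
    tailA E = tailB E := by
  have hsub : E ⊆ ["read_only", "operator", "admin"] := fun x hx => hs x hx
  have hlen : E.length ≤ 3 := (hn.subperm hsub).length_le
  match E, hn, hs with
  | [], _, _ => decide
  | [a], hn, hs =>
    have ha := hs a (by simp); simp at ha
    rcases ha with rfl|rfl|rfl <;> decide
  | [a, b], hn, hs =>
    have ha := hs a (by simp); simp at ha
    have hb := hs b (by simp); simp at hb
    rcases ha with rfl|rfl|rfl <;> rcases hb with rfl|rfl|rfl <;> revert hn <;> decide
  | [a, b, c], hn, hs =>
    have ha := hs a (by simp); simp at ha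
    have hb := hs b (by simp); simp at hb
    have hc := hs c (by simp); simp at hc
    rcases ha with rfl|rfl|rfl <;> rcases hb with rfl|rfl|rfl <;> rcases hc with rfl|rfl|rfl <;>
      revert hn <;> decide
  | a :: b :: c :: d :: t, _, _ => simp at hlen; omega

-- ===== VERDICT (by name: the statement is the Claim_ definition above) =====
theorem expand_scopes_py_spec : Claim_equal_expand_scopes_py := by
  intro scopes _
  unfold Spec_expand_scopes_py
  have hfil : scopes.filter (fun s => PySem.Set.contains VALID_SCOPES s)
      = scopes.filter (fun s => RANK.contains s) := by
    apply List.filter_congr; intro x _; exact pred_eq x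
  calc expand_scopes_py scopes
      = tailA (PySem.Set.ofList (scopes.filter (fun s => PySem.Set.contains VALID_SCOPES s))) := rfl
    _ = tailA (PySem.Set.ofList (scopes.filter (fun s => RANK.contains s))) := by rw [hfil]
    _ = tailB (PySem.Set.ofList (scopes.filter (fun s => RANK.contains s))) := by
        apply tails_eq _ (PySem.Set.nodup_ofList _)
        intro x hx
        have hx' : x ∈ scopes.filter (fun s => RANK.contains s) := by
          simpa [PySem.Set.mem_ofList] using hx
        exact mem3 x (List.of_mem_filter hx')
    _ = expand_scopes_py_alt scopes := rfl
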